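-- pv_equiv track=rewrite | github.com/mpirtskh/ai-diagram-service | app/services/agent_service.py | _parse_structured_description
-- ===== SOURCE A (Python) =====
-- def _parse_structured_description(description: str) -> tuple:
--     """
--     Parse the AI's structured description into components and connections.
--
--     This is a simple parser that looks for patterns in the text.
--     In a real app, you might use more sophisticated parsing.
--
--     Args:
--         description: The structured description from the AI
--
--     Returns:
--         Tuple of (components list, connections list)
--     """
--     components = []
--     connections = []
--
--     lines = description.split('\n')
--     in_components = False
--     in_connections = False
--
--     for line in lines:
--         line = line.strip()
--
--         if "components:" in line.lower():
--             in_components = True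
--             in_connections = False
--             continue
--         elif "connections:" in line.lower():
--             in_components = False
--             in_connections = True
--             continue
--
--         if in_components and line and not line.startswith('-'):
--             # Extract component name
--             if ':' in line:
--                 component = line.split(':')[1].strip()
--             else:
--                 component = line.strip()
--             if component:
--                 components.append(component)
--
--         elif in_connections and line and not line.startswith('-'):
--             # Extract connection
--             if '->' in line or 'connects' in line.lower():
--                 connections.append(line.strip())
--
--     # If we didn't find anything, make up some defaults
--     if not components:
--         components = ["Web Server", "Database"]
--     if not connections:
--         connections = ["Web Server -> Database"]
--
--     return components, connections
-- ===== SOURCE B (Python) =====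
-- def _parse_structured_description(description: str) -> tuple:
--     """Segment-based rewrite: scan stripped lines once into marker-labelled
--     segments (body = lines up to the next marker, preamble dropped), then
--     extract component names / connection lines from each segment in order."""
--     lines = [l.strip() for l in description.split('\n')]
--
--     def _marker(line):
--         low = line.lower()
--         if "components:" in low:
--             return True
--         if "connections:" in low:
--             return False
--         return None
--
--     segs = []
--     n = len(lines)
--     i = 0
--     while i < n and _marker(lines[i]) is None:
--         i += 1
--     while i < n:
--         label = _marker(lines[i])
--         j = i + 1
--         while j < n and _marker(lines[j]) is None:
--             j += 1
--         segs.append((label, lines[i + 1:j]))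
--         i = j
--
--     components = []
--     connections = []
--     for label, body in segs:
--         if label:
--             for line in body:
--                 if line and not line.startswith('-'):
--                     name = line.split(':')[1].strip() if ':' in line else line
--                     if name:
--                         components.append(name)
--         else:
--             for line in body:
--                 if line and not line.startswith('-') and ('->' in line or 'connects' in line.lower()):
--                     connections.append(line)
--
--     return (components or ["Web Server", "Database"],
--             connections or ["Web Server -> Database"])
-- ===== Notes on version B (the rewrite author's own statement) =====
-- stated objective: alternative
-- what changed: Replaces A's single interleaved loop with two boolean section flags by a segmentation decomposition: the stripped lines are first split into marker-labelled segments (body = lines up to the next marker, preamble discarded), then component names and connection lines are extracted per segment in separate passes.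
import Mathlib
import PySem

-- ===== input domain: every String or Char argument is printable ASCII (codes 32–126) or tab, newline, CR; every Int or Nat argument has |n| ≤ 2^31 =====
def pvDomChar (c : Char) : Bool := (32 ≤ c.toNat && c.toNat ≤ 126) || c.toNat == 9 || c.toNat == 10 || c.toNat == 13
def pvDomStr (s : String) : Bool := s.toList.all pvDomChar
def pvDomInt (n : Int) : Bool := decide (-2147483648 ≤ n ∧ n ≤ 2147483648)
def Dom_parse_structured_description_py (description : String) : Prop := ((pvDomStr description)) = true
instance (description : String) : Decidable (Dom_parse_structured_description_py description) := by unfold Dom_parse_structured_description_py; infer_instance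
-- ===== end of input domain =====

-- B replaces A's interleaved two-flag loop by a segmentation: split the stripped lines into
-- marker-labelled segments first, then extract from each segment (objective: alternative decomposition).

-- ===== PORT A =====
-- one loop iteration of A: state = (components, connections, in_components, in_connections)
def pvA_step (acc : List String × List String × Bool × Bool) (rawline : String) :
    List String × List String × Bool × Bool :=
  let line := PySem.Str.strip rawline
  if PySem.Str.isIn "components:" (PySem.Str.lower line) then
    (acc.1, acc.2.1, true, false)
  else if PySem.Str.isIn "connections:" (PySem.Str.lower line) then
    (acc.1, acc.2.1, false, true)
  else if acc.2.2.1 && !(line == "") && !(PySem.Str.startswith line "-") then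
    (if PySem.Str.isIn ":" line then
       -- line.split(':')[1]: index 1 exists because the guard ':' in line holds
       let component := PySem.Str.strip ((((PySem.Str.split? line ":").getD [])).getD 1 "")
       if component == "" then acc else (acc.1 ++ [component], acc.2.1, acc.2.2)
     else
       let component := PySem.Str.strip line
       if component == "" then acc else (acc.1 ++ [component], acc.2.1, acc.2.2))
  else if acc.2.2.2 && !(line == "") && !(PySem.Str.startswith line "-") then
    (if PySem.Str.isIn "->" line || PySem.Str.isIn "connects" (PySem.Str.lower line) then
       (acc.1, acc.2.1 ++ [PySem.Str.strip line], acc.2.2)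
     else acc)
  else acc

def parse_structured_description_py (description : String) : List String × List String :=
  let st := ((PySem.Str.split? description "\n").getD []).foldl pvA_step ([], [], false, false)
  ((if st.1 = [] then ["Web Server", "Database"] else st.1),
   (if st.2.1 = [] then ["Web Server -> Database"] else st.2.1))

-- ===== PORT B =====
-- Source B's _marker: which section a (stripped) line opens, if any
def pvMarker (line : String) : Option Bool :=
  let low := PySem.Str.lower line
  if PySem.Str.isIn "components:" low then some true
  else if PySem.Str.isIn "connections:" low then some false
  else none

def pvNonmarker (line : String) : Bool := (pvMarker line).isNone

-- Source B's segmentation scan: the outer while skips non-marker preamble lines, the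
-- inner j-while collects body lines up to the next marker (= takeWhile/dropWhile)
def pvSegments : List String → List (Bool × List String)
  | [] => []
  | l :: rest =>
    match pvMarker l with
    | none => pvSegments rest
    | some b => (b, rest.takeWhile pvNonmarker) :: pvSegments (rest.dropWhile pvNonmarker)
termination_by ls => ls.length
decreasing_by
  · simp
  · have := List.IsSuffix.length_le (List.dropWhile_suffix (l := rest) (p := pvNonmarker))
    simp only [List.length_cons]; omega

-- body of Source B's component-extraction loop (lines are already stripped)
def pvCompName? (line : String) : Option String :=
  if !(line == "") && !(PySem.Str.startswith line "-") then
    if PySem.Str.isIn ":" line then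
      -- line.split(':')[1]: index 1 exists because the guard ':' in line holds
      let name := PySem.Str.strip ((((PySem.Str.split? line ":").getD [])).getD 1 "")
      if name == "" then none else some name
    else some line
  else none

-- body of Source B's connection-filter loop
def pvConnKeep (line : String) : Bool :=
  !(line == "") && !(PySem.Str.startswith line "-") &&
    (PySem.Str.isIn "->" line || PySem.Str.isIn "connects" (PySem.Str.lower line))

def parse_structured_description_py_alt (description : String) : List String × List String :=
  let lines := ((PySem.Str.split? description "\n").getD []).map PySem.Str.strip
  let segs := pvSegments lines
  let components := segs.flatMap (fun s => if s.1 then s.2.filterMap pvCompName? else [])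
  let connections := segs.flatMap (fun s => if s.1 then [] else s.2.filter pvConnKeep)
  ((if components = [] then ["Web Server", "Database"] else components),
   (if connections = [] then ["Web Server -> Database"] else connections))

-- ===== PRECONDITION & SPEC =====
def Spec_parse_structured_description_py (description : String) (out : List String × List String) : Prop := out = parse_structured_description_py_alt description
instance (description : String) (out : List String × List String) : Decidable (Spec_parse_structured_description_py description out) := by unfold Spec_parse_structured_description_py; infer_instance

-- ===== CLAIM (what is proved, stated in full; the proofs are below) =====
def Claim_equal_parse_structured_description_py : Prop := ∀ (description : String), Dom_parse_structured_description_py description → Spec_parse_structured_description_py description (parse_structured_description_py description)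

-- ===== LEMMAS AND PROOFS =====

lemma pv_dropWhile_prefix (p : Char → Bool) {u v : List Char} (hu : u.dropWhile p = u)
    (hv : v <+: u) : v.dropWhile p = v := by
  cases v with
  | nil => simp
  | cons c t =>
    obtain ⟨r, hr⟩ := hv
    have hc : p c = false := by
      by_contra h
      have hpc : p c = true := by simpa using h
      rw [← hr, List.cons_append, List.dropWhile_cons_of_pos hpc] at hu
      have hlen := congrArg List.length hu
      have hle := List.IsSuffix.length_le (List.dropWhile_suffix (l := t ++ r) p)
      simp [List.length_append] at hle hlen
      omega
    rw [List.dropWhile_cons_of_neg (by simp [hc])]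

lemma pv_chars_strip_idem (s : List Char) :
    PySem.Chars.strip (PySem.Chars.strip s) = PySem.Chars.strip s := by
  unfold PySem.Chars.strip PySem.Chars.lstrip PySem.Chars.rstrip
  set p := PySem.Chars.isspace
  set u := s.dropWhile p with hu_def
  have hu : u.dropWhile p = u := List.dropWhile_idempotent p s
  have hpre : (u.reverse.dropWhile p).reverse <+: u := by
    have h1 : u.reverse.dropWhile p <:+ u.reverse := List.dropWhile_suffix p
    have h2 := h1.reverse
    simpa using h2
  rw [pv_dropWhile_prefix p hu hpre]
  rw [List.reverse_reverse, List.dropWhile_idempotent]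

lemma pv_strip_idem (s : String) :
    PySem.Str.strip (PySem.Str.strip s) = PySem.Str.strip s := by
  simp [PySem.Str.strip, pv_chars_strip_idem]

-- A's step only reads the stripped line
lemma pvA_step_strip (acc : List String × List String × Bool × Bool) (l : String) :
    pvA_step acc (PySem.Str.strip l) = pvA_step acc l := by
  simp only [pvA_step, pv_strip_idem]

-- A's pair of exclusive flags corresponds to the Option-valued section state
def pvFlags : Option Bool → Bool × Bool
  | none => (false, false)
  | some true => (true, false)
  | some false => (false, true)

-- last marker seen, starting from section state b
def pvLastB (b : Option Bool) (ls : List String) : Option Bool :=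
  ls.foldl (fun s l => match pvMarker l with | some t => some t | none => s) b

-- intermediate single-pass form: what A computes over stripped lines from state b
def pvRun : Option Bool → List String → List String × List String
  | _, [] => ([], [])
  | b, l :: rest =>
    match pvMarker l with
    | some tb => pvRun (some tb) rest
    | none =>
      let p := pvRun b rest
      match b with
      | none => p
      | some true => ((pvCompName? l).toList ++ p.1, p.2)
      | some false => (p.1, (if pvConnKeep l then [l] else []) ++ p.2)

-- A's fold over stripped lines = pvRun
lemma pvL1 (ls : List String) (hstrip : ∀ l ∈ ls, PySem.Str.strip l = l)
    (cs ns : List String) (b : Option Bool) :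
    ls.foldl pvA_step (cs, ns, pvFlags b) =
      (cs ++ (pvRun b ls).1, ns ++ (pvRun b ls).2, pvFlags (pvLastB b ls)) := by
  induction ls generalizing cs ns b with
  | nil => simp [pvRun, pvLastB]
  | cons l rest ih =>
    have hl : PySem.Str.strip l = l := hstrip l (by simp)
    have hrest : ∀ x ∈ rest, PySem.Str.strip x = x := fun x hx => hstrip x (by simp [hx])
    simp only [List.foldl_cons, pvA_step, hl]
    by_cases h1 : PySem.Str.isIn "components:" (PySem.Str.lower l) = true
    · have hm : pvMarker l = some true := by unfold pvMarker; rw [if_pos h1]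
      simp only [h1, if_true, pvRun, pvLastB, List.foldl_cons, hm]
      exact ih hrest cs ns (some true)
    · simp only [h1, if_false, Bool.false_eq_true]
      by_cases h2 : PySem.Str.isIn "connections:" (PySem.Str.lower l) = true
      · have hm : pvMarker l = some false := by unfold pvMarker; rw [if_neg h1, if_pos h2]
        simp only [h2, if_true, pvRun, pvLastB, List.foldl_cons, hm]
        exact ih hrest cs ns (some false)
      · have hm : pvMarker l = none := by unfold pvMarker; rw [if_neg h1, if_neg h2]
        simp only [h2, if_false, Bool.false_eq_true]
        simp only [pvRun, pvLastB, List.foldl_cons, hm]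
        rcases b with _ | b
        · simp only [pvFlags, Bool.false_and, Bool.false_eq_true, if_false]
          exact ih hrest cs ns none
        · cases b with
          | false =>
            -- connections section
            simp only [pvFlags, Bool.false_and, Bool.false_eq_true, if_false, Bool.true_and]
            by_cases hc1 : (!(l == "") && !(PySem.Str.startswith l "-")) = true
            · simp only [hc1, if_true]
              by_cases hc2 : (PySem.Str.isIn "->" l ||
                  PySem.Str.isIn "connects" (PySem.Str.lower l)) = true
              · have hk : pvConnKeep l = true := by
                  simp only [pvConnKeep, hc1, Bool.true_and]; exact hc2
                simp only [hc2, if_true]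
                rw [show ((cs, ns ++ [l], false, true) :
                      List String × List String × Bool × Bool) =
                    (cs, ns ++ [l], pvFlags (some false)) from rfl,
                  ih hrest cs (ns ++ [l]) (some false)]
                simp [hk, List.append_assoc, pvLastB, pvFlags.eq_def]
              · have hk : pvConnKeep l = false := by
                  simp only [pvConnKeep, Bool.eq_false_iff.mpr hc2, Bool.and_false]
                simp only [hc2, if_false, Bool.false_eq_true]
                rw [show ((cs, ns, false, true) :
                      List String × List String × Bool × Bool) =
                    (cs, ns, pvFlags (some false)) from rfl,
                  ih hrest cs ns (some false)]
                simp [hk, pvLastB, pvFlags.eq_def]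
            · have hk : pvConnKeep l = false := by
                simp only [pvConnKeep, Bool.eq_false_iff.mpr hc1, Bool.false_and]
              simp only [hc1, if_false, Bool.false_eq_true]
              rw [show ((cs, ns, false, true) :
                    List String × List String × Bool × Bool) =
                  (cs, ns, pvFlags (some false)) from rfl,
                ih hrest cs ns (some false)]
              simp [hk, pvLastB, pvFlags.eq_def]
          | true =>
            -- components section
            simp only [pvFlags, Bool.true_and]
            by_cases hc1 : (!(l == "") && !(PySem.Str.startswith l "-")) = true
            · simp only [hc1, if_true]
              by_cases hcol : PySem.Str.isIn ":" l = true
              · by_cases hemp : (PySem.Str.strip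
                    (((PySem.Str.split? l ":").getD []).getD 1 "") == "") = true
                · have hn : pvCompName? l = none := by
                    simp only [pvCompName?, hc1, if_true, hcol, hemp]
                  simp only [hcol, if_true, hemp]
                  rw [show ((cs, ns, true, false) :
                        List String × List String × Bool × Bool) =
                      (cs, ns, pvFlags (some true)) from rfl,
                    ih hrest cs ns (some true)]
                  simp [hn, pvLastB, pvFlags.eq_def]
                · have hs : pvCompName? l = some (PySem.Str.strip
                      (((PySem.Str.split? l ":").getD []).getD 1 "")) := by
                    simp only [pvCompName?, hc1, if_true, hcol,
                      Bool.eq_false_iff.mpr hemp, Bool.false_eq_true, if_false]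
                  simp only [hcol, if_true, hemp, Bool.false_eq_true, if_false]
                  rw [show ((cs ++ [PySem.Str.strip
                        (((PySem.Str.split? l ":").getD []).getD 1 "")], ns, true, false) :
                        List String × List String × Bool × Bool) =
                      (cs ++ [PySem.Str.strip
                        (((PySem.Str.split? l ":").getD []).getD 1 "")], ns,
                        pvFlags (some true)) from rfl,
                    ih hrest (cs ++ [PySem.Str.strip
                      (((PySem.Str.split? l ":").getD []).getD 1 "")]) ns (some true)]
                  simp [hs, List.append_assoc, pvLastB, pvFlags.eq_def]
              · have hne : (l == "") = false := by
                  have h := Bool.and_elim_left hc1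
                  cases hx : (l == "") with
                  | false => rfl
                  | true => rw [hx] at h; exact absurd h (by simp)
                have hs : pvCompName? l = some l := by
                  simp only [pvCompName?, hc1, if_true,
                    Bool.eq_false_iff.mpr hcol, Bool.false_eq_true, if_false]
                simp only [hcol, Bool.false_eq_true, if_false, hne]
                rw [show ((cs ++ [l], ns, true, false) :
                      List String × List String × Bool × Bool) =
                    (cs ++ [l], ns, pvFlags (some true)) from rfl,
                  ih hrest (cs ++ [l]) ns (some true)]
                simp [hs, List.append_assoc, pvLastB, pvFlags.eq_def]
            · have hn : pvCompName? l = none := by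
                simp only [pvCompName?, Bool.eq_false_iff.mpr hc1, Bool.false_eq_true, if_false]
              simp only [hc1, if_false, Bool.false_eq_true, Bool.false_and]
              rw [show ((cs, ns, true, false) :
                    List String × List String × Bool × Bool) =
                  (cs, ns, pvFlags (some true)) from rfl,
                ih hrest cs ns (some true)]
              simp [hn, pvLastB, pvFlags.eq_def]

-- segment list pending from section state b
def pvSegsFrom (b : Option Bool) (ls : List String) : List (Bool × List String) :=
  match b with
  | none => pvSegments ls
  | some tb => (tb, ls.takeWhile pvNonmarker) :: pvSegments (ls.dropWhile pvNonmarker)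

-- pvRun = per-segment extraction over the pending segments
lemma pvL2 (ls : List String) (b : Option Bool) :
    pvRun b ls =
      ((pvSegsFrom b ls).flatMap (fun s => if s.1 then s.2.filterMap pvCompName? else []),
       (pvSegsFrom b ls).flatMap (fun s => if s.1 then [] else s.2.filter pvConnKeep)) := by
  induction ls generalizing b with
  | nil =>
    rcases b with _ | b
    · simp [pvRun, pvSegsFrom, pvSegments]
    · cases b <;> simp [pvRun, pvSegsFrom, pvSegments]
  | cons l rest ih =>
    cases hm : pvMarker l with
    | some tb =>
      have hnm : pvNonmarker l = false := by simp [pvNonmarker, hm]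
      have hseg : pvSegments (l :: rest) = pvSegsFrom (some tb) rest := by
        rw [pvSegments]; simp [hm, pvSegsFrom]
      rcases b with _ | b
      · simp only [pvRun, hm, pvSegsFrom, hseg]
        exact ih (some tb)
      · simp only [pvRun, hm, pvSegsFrom, List.takeWhile_cons, hnm, Bool.false_eq_true,
          if_false, List.dropWhile_cons, hseg]
        rw [ih (some tb)]
        cases b <;> simp [pvSegsFrom, List.flatMap_cons]
    | none =>
      have hnm : pvNonmarker l = true := by simp [pvNonmarker, hm]
      rcases b with _ | b
      · have hseg : pvSegments (l :: rest) = pvSegments rest := by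
          rw [pvSegments]; simp [hm]
        simp only [pvRun, hm, pvSegsFrom, hseg]
        exact ih none
      · cases b
        · -- connections segment: line l joins the current body
          simp only [pvRun, hm, pvSegsFrom, List.takeWhile_cons, hnm, if_true,
            List.dropWhile_cons, ih (some false)]
          simp [List.flatMap_cons, List.filter_cons]
          split_ifs <;> simp
        · -- components segment: line l joins the current body
          simp only [pvRun, hm, pvSegsFrom, List.takeWhile_cons, hnm, if_true,
            List.dropWhile_cons, ih (some true)]
          simp [List.flatMap_cons, List.filterMap_cons]
          cases hc : pvCompName? l <;> simp

-- ===== VERDICT (by name: the statement is the Claim_ definition above) =====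
theorem parse_structured_description_py_spec : Claim_equal_parse_structured_description_py := by
  intro description _
  unfold Spec_parse_structured_description_py
  unfold parse_structured_description_py parse_structured_description_py_alt
  set lines0 := (PySem.Str.split? description "\n").getD [] with hlines0
  have hfold : lines0.foldl pvA_step ([], [], false, false) =
      (lines0.map PySem.Str.strip).foldl pvA_step ([], [], false, false) := by
    rw [List.foldl_map]
    exact PySem.List.foldl_congr_mem (l := lines0) _ _ _ (fun acc x _ => (pvA_step_strip acc x).symm)
  have hstrip : ∀ l ∈ lines0.map PySem.Str.strip, PySem.Str.strip l = l := by
    intro l hl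
    obtain ⟨x, _, hx⟩ := List.mem_map.mp hl
    rw [← hx]; exact pv_strip_idem x
  have h1 := pvL1 (lines0.map PySem.Str.strip) hstrip [] [] none
  have h2 := pvL2 (lines0.map PySem.Str.strip) none
  simp only [pvFlags] at h1
  simp only [pvSegsFrom] at h2
  simp only [hfold, h1, h2, List.nil_append]
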